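-- pv_equiv track=rewrite | github.com/wahchi/python_interview | answer.py | get_high_score
-- ===== SOURCE A (Python) =====
-- def get_high_score(desk, mine):
--     # 你的实现
--     pop_mine = sorted(mine).copy()
--
--     result = []
--     score = 0
--
--     for i in range(len(desk)):
--         j = 0
--         while j < len(pop_mine):
--             if pop_mine[j] > desk[i]:
--                 result.append(pop_mine[j])
--                 pop_mine.remove(pop_mine[j])
--                 score += 1
--                 break
--             j += 1
--         if len(result) != i+1:
--             result.append(None)
--
--     # fill None
--     for i in range(len(result)):
--         if result[i] is None:
--             result[i] = pop_mine.pop()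
--
--     # return result, score
--     return result, score
-- ===== SOURCE B (Python) =====
-- def get_high_score(desk, mine):
--     pm = sorted(mine)
--     out = []
--     score = 0
--     for d in desk:
--         # binary search: lo = first index with pm[lo] > d (bisect_right)
--         lo, hi = 0, len(pm)
--         while lo < hi:
--             mid = (lo + hi) // 2
--             if pm[mid] <= d:
--                 lo = mid + 1
--             else:
--                 hi = mid
--         if lo < len(pm):
--             out.append(pm.pop(lo))
--             score += 1
--         else:
--             out.append(None)
--     # hand out the unused cards, largest first, to the unmatched slots
--     k = len(pm)
--     filled = []
--     for x in out:
--         if x is None: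
--             k -= 1
--             x = pm[k]
--         filled.append(x)
--     return filled, score
-- ===== Notes on version B (the rewrite author's own statement) =====
-- stated objective: faster
-- what changed: B replaces A's per-desk linear scan of the remaining hand (and its value-based list.remove) with a hand-written binary search (bisect_right) over the sorted hand followed by removal by index, and fills the unmatched slots by indexing the leftover cards from the back instead of repeatedly popping.
import Mathlib
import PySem

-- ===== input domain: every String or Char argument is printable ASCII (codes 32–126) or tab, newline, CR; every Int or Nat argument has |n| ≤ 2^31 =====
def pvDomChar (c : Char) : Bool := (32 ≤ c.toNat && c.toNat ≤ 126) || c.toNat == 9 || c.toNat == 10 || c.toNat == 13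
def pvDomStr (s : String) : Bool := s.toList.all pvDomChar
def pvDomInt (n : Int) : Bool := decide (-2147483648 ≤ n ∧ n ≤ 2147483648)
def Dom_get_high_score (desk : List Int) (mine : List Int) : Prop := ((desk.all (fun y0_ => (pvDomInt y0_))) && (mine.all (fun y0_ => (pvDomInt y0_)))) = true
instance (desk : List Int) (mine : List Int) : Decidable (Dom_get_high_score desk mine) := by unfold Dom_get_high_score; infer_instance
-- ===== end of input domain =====

-- B replaces A's per-desk linear scan of the remaining sorted hand with a binary search
-- plus removal by index, and fills unmatched slots by back-indexing instead of popping.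


-- ===== PORT A =====
-- inner 'while j < len(pop_mine)' loop: scan for the first card beating d, append it and
-- remove it by VALUE (list.remove) as A does.  The Nat fuel only makes the j-increment
-- loop structurally total; it is called with enough fuel to never run out.
def whileA (pm : List Int) (d : Int) : Nat → Nat → Option (Int × List Int)
  | _, 0 => none
  | j, fuel + 1 =>
    if h : j < pm.length then
      if pm[j] > d then some (pm[j], (PySem.List.remove? pm pm[j]).getD pm)
      else whileA pm d (j + 1) fuel
    else none

-- outer 'for i in range(len(desk))' loop, with A's 'if len(result) != i+1: append None';
-- fuel as above
def loopA (desk : List Int) : Nat → Nat → List (Option Int) → List Int → Int →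
    List (Option Int) × List Int × Int
  | _, 0, result, pm, score => (result, pm, score)
  | i, fuel + 1, result, pm, score =>
    if h : i < desk.length then
      let st :=
        match whileA pm desk[i] 0 (pm.length + 1) with
        | some (v, pm') => (result ++ [some v], pm', score + 1)
        | none => (result, pm, score)
      let result2 := if st.1.length ≠ i + 1 then st.1 ++ [none] else st.1
      loopA desk (i + 1) fuel result2 st.2.1 st.2.2
    else (result, pm, score)

-- 'fill None' loop: each None slot gets pop_mine.pop() (pop of the LAST remaining card);
-- the none-branch of pop? is Python's IndexError (excluded by Pre_)
def fillA (res : List (Option Int)) (pm : List Int) : List Int × List Int :=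
  match res with
  | [] => ([], pm)
  | some v :: rest => let r := fillA rest pm; (v :: r.1, r.2)
  | none :: rest =>
      match PySem.List.pop? pm with
      | some (v, pm') => let r := fillA rest pm'; (v :: r.1, r.2)
      | none => (rest.map (fun o => o.getD 0), pm)  -- IndexError in Python; unreachable under Pre_

def get_high_score (desk : List Int) (mine : List Int) : List Int × Int :=
  let pm := PySem.List.sorted mine (fun x => x)
  let st := loopA desk 0 (desk.length + 1) [] pm 0
  ((fillA st.1 st.2.1).1, st.2.2)

-- ===== PORT B =====
-- B's hand-written bisect_right ('while lo < hi'): first index lo with pm[lo] > d;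
-- the Nat fuel only makes the halving loop structurally total
def bisectB (pm : List Int) (d : Int) : Nat → Nat → Nat → Nat
  | lo, _, 0 => lo
  | lo, hi, fuel + 1 =>
    if lo < hi then
      let mid := (lo + hi) / 2
      if pm.getD mid 0 ≤ d then bisectB pm d (mid + 1) hi fuel else bisectB pm d lo mid fuel
    else lo

def loopB (desk : List Int) (pm : List Int) (out : List (Option Int)) (score : Int) :
    List (Option Int) × List Int × Int :=
  match desk with
  | [] => (out, pm, score)
  | d :: rest =>
      let lo := bisectB pm d 0 pm.length pm.length
      if h : lo < pm.length then
        loopB rest (pm.eraseIdx lo) (out ++ [some pm[lo]]) (score + 1)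
      else loopB rest pm (out ++ [none]) score

-- B's fill: k counts down; a None slot takes pm[k-1] ('k -= 1; x = pm[k]')
def fillB (out : List (Option Int)) (pm : List Int) (k : Nat) : List Int :=
  match out with
  | [] => []
  | some v :: rest => v :: fillB rest pm k
  | none :: rest => pm.getD (k - 1) 0 :: fillB rest pm (k - 1)

def get_high_score_alt (desk : List Int) (mine : List Int) : List Int × Int :=
  let pm := PySem.List.sorted mine (fun x => x)
  let st := loopB desk pm [] 0
  (fillB st.1 st.2.1 st.2.1.length, st.2.2)

-- ===== PRECONDITION & SPEC =====
-- Pre_ excludes exactly the inputs with more desk cards than hand cards, on which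
-- A's fill loop pops from an exhausted hand and raises IndexError.
def Pre_get_high_score (desk : List Int) (mine : List Int) : Prop := desk.length ≤ mine.length
instance (desk : List Int) (mine : List Int) : Decidable (Pre_get_high_score desk mine) := by unfold Pre_get_high_score; infer_instance
def pvWitness_get_high_score : List Int × List Int := ([2, 5], [1, 3, 6])

def Spec_get_high_score (desk : List Int) (mine : List Int) (out : List Int × Int) : Prop := out = get_high_score_alt desk mine
instance (desk : List Int) (mine : List Int) (out : List Int × Int) : Decidable (Spec_get_high_score desk mine out) := by unfold Spec_get_high_score; infer_instance

-- ===== CLAIM (what is proved, stated in full; the proofs are below) =====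
def Claim_equal_get_high_score : Prop := ∀ (desk : List Int) (mine : List Int), Dom_get_high_score desk mine → Pre_get_high_score desk mine → Spec_get_high_score desk mine (get_high_score desk mine)

-- ===== LEMMAS AND PROOFS =====

-- the boundary both searches find: n = the number of remaining cards ≤ d
def IsBdry (pm : List Int) (d : Int) (n : Nat) : Prop :=
  n ≤ pm.length ∧ (∀ i, i < n → pm.getD i 0 ≤ d) ∧ (∀ i, n ≤ i → i < pm.length → d < pm.getD i 0)

theorem remove_eq_eraseIdx : ∀ (pm : List Int) (n : Nat) (h : n < pm.length),
    (∀ i, i < n → pm.getD i 0 ≠ pm[n]) → PySem.List.remove? pm pm[n] = some (pm.eraseIdx n) := by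
  intro pm
  induction pm with
  | nil => intro n h; simp at h
  | cons x rest ih =>
    intro n h hne
    cases n with
    | zero => simp [PySem.List.remove?_cons_self x rest]
    | succ m =>
      have hm : m < rest.length := by simpa using h
      have hx : x ≠ rest[m] := by
        have := hne 0 (Nat.succ_pos m); simpa using this
      have hme : (x :: rest)[m+1] = rest[m] := by simp
      rw [List.eraseIdx_cons_succ, hme]
      have h2 := PySem.List.remove?_cons_of_ne (v := rest[m]) rest hx
      rw [h2, ih m hm]
      · rfl
      · intro i hi
        have := hne (i+1) (by omega)
        simpa using this

theorem bisectB_bdry (pm : List Int) (d : Int) (hs : pm.Pairwise (· ≤ ·)) :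
    ∀ fuel lo hi, lo ≤ hi → hi ≤ pm.length → hi - lo ≤ fuel →
    (∀ i, i < lo → pm.getD i 0 ≤ d) → (∀ i, hi ≤ i → i < pm.length → d < pm.getD i 0) →
    IsBdry pm d (bisectB pm d lo hi fuel) := by
  have hmono : ∀ i j, i ≤ j → j < pm.length → pm.getD i 0 ≤ pm.getD j 0 := by
    intro i j hij hj
    rcases Nat.eq_or_lt_of_le hij with rfl | hlt
    · exact le_refl _
    · have hi : i < pm.length := lt_trans hlt hj
      rw [List.getD_eq_getElem pm 0 hi, List.getD_eq_getElem pm 0 hj]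
      exact List.pairwise_iff_getElem.mp hs i j hi hj hlt
  intro fuel
  induction fuel with
  | zero =>
    intro lo hi hl hhi hf hlo hhiU
    have heq : lo = hi := by omega
    subst heq
    rw [bisectB]
    exact ⟨by omega, hlo, by intro i hi' hilen; exact hhiU i (by omega) hilen⟩
  | succ fuel ih =>
    intro lo hi hl hhi hf hlo hhiU
    rw [bisectB]
    by_cases h : lo < hi
    · rw [if_pos h]
      by_cases hle : pm.getD ((lo + hi) / 2) 0 ≤ d
      · rw [if_pos hle]
        exact ih ((lo + hi) / 2 + 1) hi (by omega) hhi (by omega)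
          (by intro i hi'
              rcases Nat.lt_or_ge i lo with h2 | h2
              · exact hlo i h2
              · exact le_trans (hmono i ((lo + hi) / 2) (by omega) (by omega)) hle)
          hhiU
      · rw [if_neg hle]
        exact ih lo ((lo + hi) / 2) (by omega) (by omega) (by omega) hlo
          (by intro i hi' hilen
              exact lt_of_lt_of_le (by omega : d < pm.getD ((lo + hi) / 2) 0)
                (hmono ((lo + hi) / 2) i hi' hilen))
    · rw [if_neg h]
      exact ⟨by omega, hlo, by intro i hi' hilen; exact hhiU i (by omega) hilen⟩

theorem whileA_eq (pm : List Int) (d : Int) (n : Nat) (hb : IsBdry pm d n) :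
    ∀ fuel j, j ≤ n → pm.length < j + fuel →
    whileA pm d j fuel = if h : n < pm.length then some (pm[n], pm.eraseIdx n) else none := by
  obtain ⟨hn1, hn2, hn3⟩ := hb
  intro fuel
  induction fuel with
  | zero => intro j hjn hfuel; omega
  | succ fuel ih =>
    intro j hjn hfuel
    rw [whileA]
    by_cases h : j < pm.length
    · rw [dif_pos h]
      by_cases hgt : pm[j] > d
      · rw [if_pos hgt]
        have hjge : n ≤ j := by
          by_contra hc
          have := hn2 j (by omega)
          rw [List.getD_eq_getElem pm 0 h] at this
          omega
        have hjn' : j = n := le_antisymm hjn hjge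
        subst hjn'
        rw [dif_pos h, remove_eq_eraseIdx pm j h]
        · rfl
        · intro i hi
          have h1 := hn2 i hi
          rw [List.getD_eq_getElem pm 0 (show i < pm.length by omega)] at h1 ⊢
          omega
      · rw [if_neg hgt]
        have hne : j ≠ n := by
          intro hc; subst hc
          have := hn3 j (le_refl j) h
          rw [List.getD_eq_getElem pm 0 h] at this
          omega
        exact ih (j + 1) (by omega) (by omega)
    · rw [dif_neg h, dif_neg (by omega)]

theorem loop_eq (desk : List Int) : ∀ (ds : List Int) (i fuel : Nat) (res : List (Option Int))
    (pm : List Int) (score : Int), desk.drop i = ds → res.length = i →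
    desk.length ≤ i + fuel → pm.Pairwise (· ≤ ·) →
    loopA desk i fuel res pm score = loopB ds pm res score := by
  intro ds
  induction ds with
  | nil =>
    intro i fuel res pm score hdrop hlen hfuel hs
    have hge : desk.length ≤ i := by
      have := List.drop_eq_nil_iff.mp hdrop
      omega
    cases fuel with
    | zero => rw [loopA, loopB]
    | succ fuel => rw [loopA, dif_neg (by omega), loopB]
  | cons d rest ih =>
    intro i fuel res pm score hdrop hlen hfuel hs
    have hi : i < desk.length := by
      by_contra hc
      rw [List.drop_eq_nil_iff.mpr (by omega)] at hdrop
      simp at hdrop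
    cases fuel with
    | zero => omega
    | succ fuel =>
    have hcons : desk.drop i = desk[i] :: desk.drop (i+1) := List.drop_eq_getElem_cons hi
    rw [hdrop] at hcons
    have hd : desk[i] = d := by injection hcons with h1 h2; exact h1.symm
    have hrest : desk.drop (i+1) = rest := by injection hcons with h1 h2; exact h2.symm
    have hb := bisectB_bdry pm d hs pm.length 0 pm.length (Nat.zero_le _) (le_refl _) (by omega)
      (by intro i hi; omega) (by intro i h1 h2; omega)
    have hw := whileA_eq pm d (bisectB pm d 0 pm.length pm.length) hb (pm.length + 1) 0
      (Nat.zero_le _) (by omega)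
    rw [loopA, dif_pos hi, loopB, hd]
    by_cases hlo : bisectB pm d 0 pm.length pm.length < pm.length
    · rw [hw, dif_pos hlo]
      simp only [dif_pos hlo]
      have hlen1 : (res ++ [some pm[bisectB pm d 0 pm.length pm.length]]).length = i + 1 := by
        simp [hlen]
      rw [if_neg (by simp [hlen1])]
      exact ih (i+1) fuel _ _ (score+1) hrest hlen1 (by omega)
        (hs.sublist (List.eraseIdx_sublist pm (bisectB pm d 0 pm.length pm.length)))
    · rw [hw, dif_neg hlo]
      simp only [dif_neg hlo]
      rw [if_pos (by simp [hlen])]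
      exact ih (i+1) fuel _ _ score hrest (by simp [hlen]) (by omega) hs

theorem loopB_count : ∀ (ds : List Int) (pm : List Int) (out : List (Option Int)) (score : Int),
    ((loopB ds pm out score).1.countP (·.isNone)) + pm.length =
      (out.countP (·.isNone)) + ds.length + (loopB ds pm out score).2.1.length := by
  intro ds
  induction ds with
  | nil => intro pm out score; simp [loopB]
  | cons d rest ih =>
    intro pm out score
    rw [loopB]
    by_cases hlo : bisectB pm d 0 pm.length pm.length < pm.length
    · rw [dif_pos hlo]
      have := ih (pm.eraseIdx (bisectB pm d 0 pm.length pm.length))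
        (out ++ [some pm[bisectB pm d 0 pm.length pm.length]]) (score + 1)
      rw [List.length_eraseIdx, if_pos hlo] at this
      simp at this
      simp only [List.length_cons]
      omega
    · rw [dif_neg hlo]
      have := ih pm (out ++ [none]) score
      simp at this
      simp only [List.length_cons]
      omega

theorem fill_eq (pm : List Int) : ∀ (res : List (Option Int)) (k : Nat), k ≤ pm.length →
    res.countP (·.isNone) ≤ k →
    (fillA res (pm.take k)).1 = fillB res pm k := by
  intro res
  induction res with
  | nil => intro k _ _; rfl
  | cons o rest ih =>
    intro k hk hcnt
    cases o with
    | some v =>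
      rw [fillA, fillB]
      simp only []
      rw [ih k hk (by simp at hcnt ⊢; omega)]
    | none =>
      have h1 : 1 ≤ k := by
        simp at hcnt; omega
      have hk1 : k - 1 < pm.length := by omega
      have htake : pm.take k = pm.take (k-1) ++ [pm[k-1]] := by
        conv_lhs => rw [show k = (k-1)+1 by omega]
        rw [List.take_add_one, List.getElem?_eq_getElem hk1]
        rfl
      rw [fillA, fillB, htake, PySem.List.pop?_last]
      simp only []
      rw [ih (k-1) (by omega) (by simp at hcnt; omega)]
      rw [List.getD_eq_getElem pm 0 hk1]

theorem get_high_score_eq_alt : ∀ (desk : List Int) (mine : List Int),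
    desk.length ≤ mine.length → get_high_score desk mine = get_high_score_alt desk mine := by
  intro desk mine hpre
  show ((fillA (loopA desk 0 (desk.length + 1) [] (PySem.List.sorted mine (fun x => x)) 0).1 (loopA desk 0 (desk.length + 1) [] (PySem.List.sorted mine (fun x => x)) 0).2.1).1, (loopA desk 0 (desk.length + 1) [] (PySem.List.sorted mine (fun x => x)) 0).2.2) = ((fillB (loopB desk (PySem.List.sorted mine (fun x => x)) [] 0).1 (loopB desk (PySem.List.sorted mine (fun x => x)) [] 0).2.1 (loopB desk (PySem.List.sorted mine (fun x => x)) [] 0).2.1.length), (loopB desk (PySem.List.sorted mine (fun x => x)) [] 0).2.2)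
  have hs : (PySem.List.sorted mine (fun x => x)).Pairwise (· ≤ ·) :=
    PySem.List.sorted_pairwise mine (fun x => x)
  rw [loop_eq desk desk 0 (desk.length + 1) [] _ 0 List.drop_zero rfl (by omega) hs]
  have hcnt := loopB_count desk (PySem.List.sorted mine (fun x => x)) [] 0
  simp only [List.countP_nil, PySem.List.length_sorted] at hcnt
  have hfill := fill_eq (loopB desk (PySem.List.sorted mine (fun x => x)) [] 0).2.1
    (loopB desk (PySem.List.sorted mine (fun x => x)) [] 0).1
    (loopB desk (PySem.List.sorted mine (fun x => x)) [] 0).2.1.length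
    (le_refl _) (by omega)
  rw [List.take_length] at hfill
  rw [hfill]

-- ===== VERDICT (by name: the statement is the Claim_ definition above) =====
theorem get_high_score_spec : Claim_equal_get_high_score := by
  intro desk mine _ hpre
  unfold Spec_get_high_score
  exact get_high_score_eq_alt desk mine hpre
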